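-- pv_equiv track=rewrite | github.com/minsuh99/PNU_DS_CodingTestStudy | 4주차/문제4/이장하_양과 늑대.py | solution
-- ===== SOURCE A (Python) =====
-- def solution(info, edges):
--     answer = []
--     # 방문한 노드를 체크할 리스트
--     visited = [False] * len(info)
--
--     # 깊이 우선 탐색 방법으로 이동할 수 있는 노드를 탐색
--     def dfs(sheeps, wolves):
--         # 양이 늑대보다 많은 경우 현재 양의 개수를 리스트에 저장
--         if sheeps > wolves:
--             answer.append(sheeps)
--         # 늑대가 양보다 같거나 많을 경우 종료
--         else:
--             return
--
--         for p, c in edges: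
--             # 부모는 방문하였지만 자식은 방문 안한 경우만 진행
--             if visited[p] and not visited[c]:
--                 visited[c] = True
--                 if info[c] == 0:
--                     dfs(sheeps + 1, wolves)
--                 else:
--                     dfs(sheeps, wolves + 1)
--                 # 만약 다른 곳을 들렸다 방문 시 조건에 충족할 수 있어 false 처리
--                 visited[c] = False
--
--     visited[0] = True
--     dfs(1, 0)
--
--     return max(answer)
-- ===== SOURCE B (Python) =====
-- def solution(info, edges):
--     n = len(info)
--     children = [[] for _ in range(n)]
--     for p, c in edges:
--         children[p].append(c)
--
--     visited = [False] * n
--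
--     def dfs(sheep, wolf, frontier):
--         if sheep <= wolf:
--             return 0
--         best = sheep
--         for x in frontier:
--             visited[x] = True
--             nf = [y for y in frontier + children[x] if not visited[y]]
--             if info[x] == 0:
--                 best = max(best, dfs(sheep + 1, wolf, nf))
--             else:
--                 best = max(best, dfs(sheep, wolf + 1, nf))
--             visited[x] = False
--         return best
--
--     visited[0] = True
--     return dfs(1, 0, [y for y in children[0] if not visited[y]])
-- ===== Notes on version B (the rewrite author's own statement) =====
-- stated objective: alternative
-- what changed: B precomputes a children adjacency list once and does a DFS over an explicitly maintained frontier list of candidate nodes with a running max, instead of A's rescan of the whole edge list against a visited array at every recursion step and a global answer list maximised at the end; …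
-- outside the precondition, e.g. on solution([0, 1], [(1, 5)]): A returns 1, B returns 1; on solution([-1, 0, 1], [(1, 2), (0, 2), (2, 5)]): A returns 1, B raises IndexError
import Mathlib
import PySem

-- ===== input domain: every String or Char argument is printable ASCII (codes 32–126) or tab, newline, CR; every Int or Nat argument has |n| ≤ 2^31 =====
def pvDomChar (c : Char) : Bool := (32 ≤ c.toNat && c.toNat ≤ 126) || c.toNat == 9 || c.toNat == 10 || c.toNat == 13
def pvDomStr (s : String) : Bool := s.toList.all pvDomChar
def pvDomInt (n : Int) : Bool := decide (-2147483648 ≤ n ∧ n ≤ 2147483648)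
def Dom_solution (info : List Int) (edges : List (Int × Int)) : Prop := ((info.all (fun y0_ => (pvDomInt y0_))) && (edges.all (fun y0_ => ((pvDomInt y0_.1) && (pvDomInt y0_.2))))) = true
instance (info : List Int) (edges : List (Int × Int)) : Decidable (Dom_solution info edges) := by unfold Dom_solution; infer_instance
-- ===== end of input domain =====

-- B precomputes a children adjacency list once and does a DFS over an explicitly maintained
-- frontier list of candidate nodes with a running max, instead of A's rescan of the whole edge
-- list at every recursion step and a global answer list maximised at the end (objective:
-- alternative decomposition). B mutates only its own local visited list, not the arguments.
-- ===== PORT A =====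
def pyGetB (v : List Bool) (i : Int) : Bool := PySem.List.pyGetD v i false

def getI (info : List Int) (i : Int) : Int := PySem.List.pyGetD info i 0

def dfsA (info : List Int) (edges : List (Int × Int)) : Nat → List Bool → Int → Int → List Int
  | 0, _, _, _ => []
  | fuel+1, v, s, w =>
    if s > w then
      s :: edges.foldl (fun acc pc =>
        if pyGetB v pc.1 && !pyGetB v pc.2 then
          acc ++ (if getI info pc.2 = 0
                  then dfsA info edges fuel (PySem.List.pySetD v pc.2 true) (s+1) w
                  else dfsA info edges fuel (PySem.List.pySetD v pc.2 true) s (w+1))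
        else acc) []
    else []

def solution (info : List Int) (edges : List (Int × Int)) : Int :=
  let visited := PySem.List.pySetD (List.replicate info.length false) 0 true
  let answer := dfsA info edges (info.length + 1) visited 1 0
  (PySem.List.max? answer (fun x => x)).getD 0

-- ===== PORT B =====
def buildCh (n : Nat) (edges : List (Int × Int)) : List (List Int) :=
  edges.foldl (fun ch pc =>
    PySem.List.pySetD ch pc.1 (PySem.List.pyGetD ch pc.1 [] ++ [pc.2]))
    (List.replicate n [])

def dfsB (info : List Int) (ch : List (List Int)) : Nat → List Bool → List Int → Int → Int → Int
  | 0, _, _, _, _ => 0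
  | fuel+1, vis, frontier, s, w =>
    if s ≤ w then 0
    else frontier.foldl (fun best x =>
      let nv := PySem.List.pySetD vis x true
      let nf := (frontier ++ PySem.List.pyGetD ch x []).filter (fun y => !pyGetB nv y)
      max best (if getI info x = 0 then dfsB info ch fuel nv nf (s+1) w
                else dfsB info ch fuel nv nf s (w+1))) s

def solution_alt (info : List Int) (edges : List (Int × Int)) : Int :=
  let ch := buildCh info.length edges
  let vis := PySem.List.pySetD (List.replicate info.length false) 0 true
  let fr := (PySem.List.pyGetD ch 0 []).filter (fun y => !pyGetB vis y)
  dfsB info ch (info.length + 1) vis fr 1 0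

-- ===== PRECONDITION & SPEC =====
-- Pre_ is the task's natural domain: a nonempty node list and edge endpoints that are valid list
-- indices (-len(info) ≤ i < len(info)). It excludes empty info and out-of-range endpoints, on
-- which A raises IndexError whenever the edge is examined; on the remaining excluded inputs (an
-- out-of-range child below a parent that is never visited) the bad edge is inert in both
-- programs and they return the same value.
def Pre_solution (info : List Int) (edges : List (Int × Int)) : Prop :=
  info ≠ [] ∧ ∀ pc ∈ edges,
    -(info.length : Int) ≤ pc.1 ∧ pc.1 < (info.length : Int) ∧
    -(info.length : Int) ≤ pc.2 ∧ pc.2 < (info.length : Int)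

instance (info : List Int) (edges : List (Int × Int)) : Decidable (Pre_solution info edges) := by
  unfold Pre_solution; infer_instance

def pvWitness_solution : List Int × (List (Int × Int)) := ([0, 0, 1], [(0, 1), (1, 2)])

def Spec_solution (info : List Int) (edges : List (Int × Int)) (out : Int) : Prop := out = solution_alt info edges
instance (info : List Int) (edges : List (Int × Int)) (out : Int) : Decidable (Spec_solution info edges out) := by unfold Spec_solution; infer_instance

-- ===== CLAIM (what is proved, stated in full; the proofs are below) =====
def Claim_equal_solution : Prop := ∀ (info : List Int) (edges : List (Int × Int)), Dom_solution info edges → Pre_solution info edges → Spec_solution info edges (solution info edges)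

-- ===== LEMMAS AND PROOFS =====

-- max of a list with default 0 (the value A's answer list is reduced to)
def lmax0 (l : List Int) : Int := l.foldl max 0

-- the canonical list position Python indexing resolves an in-range index to
def wrapI (n : Nat) (i : Int) : Nat := if 0 ≤ i then i.toNat else n - (-i).toNat

-- the frontier characterisation: x is an unvisited child of a visited node
abbrev chard (info : List Int) (edges : List (Int × Int)) (v : List Bool) (x : Int) : Prop :=
  -(info.length : Int) ≤ x ∧ x < (info.length : Int) ∧ pyGetB v x = false ∧
    ∃ pc ∈ edges, pc.2 = x ∧ pyGetB v pc.1 = true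

-- one branch of A's loop / of B's loop, as a function of the chosen child
def brA (info : List Int) (edges : List (Int × Int)) (fuel : Nat) (v : List Bool) (s w : Int) (c : Int) : List Int :=
  if getI info c = 0 then dfsA info edges fuel (PySem.List.pySetD v c true) (s+1) w
  else dfsA info edges fuel (PySem.List.pySetD v c true) s (w+1)

def brB (info : List Int) (edges : List (Int × Int)) (fuel : Nat) (v : List Bool) (frontier : List Int) (s w : Int) (x : Int) : Int :=
  if getI info x = 0 then
    dfsB info (buildCh info.length edges) fuel (PySem.List.pySetD v x true)
      ((frontier ++ PySem.List.pyGetD (buildCh info.length edges) x []).filter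
        (fun y => !pyGetB (PySem.List.pySetD v x true) y)) (s+1) w
  else
    dfsB info (buildCh info.length edges) fuel (PySem.List.pySetD v x true)
      ((frontier ++ PySem.List.pyGetD (buildCh info.length edges) x []).filter
        (fun y => !pyGetB (PySem.List.pySetD v x true) y)) s (w+1)

lemma pyIdx_in (n : Nat) (i : Int) (h0 : -(n : Int) ≤ i) (h1 : i < (n : Int)) :
    PySem.List.pyIdx? n i = some (wrapI n i) := by
  simp only [PySem.List.pyIdx?, wrapI]
  by_cases h : 0 ≤ i
  · rw [if_pos h, if_pos h1, if_pos h]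
  · rw [if_neg h, if_pos h0, if_neg h]

lemma wrapI_lt (n : Nat) (i : Int) (h0 : -(n : Int) ≤ i) (h1 : i < (n : Int)) (hn : 0 < n) :
    wrapI n i < n := by
  unfold wrapI; split_ifs <;> omega

lemma getD_setD {α : Type} (v : List α) (d w : α) (c i : Int)
    (hc0 : -(v.length : Int) ≤ c) (hc1 : c < (v.length : Int))
    (hi0 : -(v.length : Int) ≤ i) (hi1 : i < (v.length : Int)) :
    PySem.List.pyGetD (PySem.List.pySetD v c w) i d =
      if wrapI v.length i = wrapI v.length c then w else PySem.List.pyGetD v i d := by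
  have hn : 0 < v.length := by omega
  have hkc := wrapI_lt v.length c hc0 hc1 hn
  have hki := wrapI_lt v.length i hi0 hi1 hn
  simp only [PySem.List.pySetD, PySem.List.pySet?, pyIdx_in v.length c hc0 hc1,
    Option.map_some, Option.getD_some, PySem.List.pyGetD, PySem.List.pyGet?]
  rw [show (v.set (wrapI v.length c) w).length = v.length by simp,
    pyIdx_in v.length i hi0 hi1]
  simp only [Option.bind_some]
  rw [List.getElem?_set]
  by_cases h : wrapI v.length i = wrapI v.length c
  · rw [if_pos h, if_pos h.symm, if_pos hkc]; simp
  · rw [if_neg h, if_neg (fun hh => h hh.symm)]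

lemma length_setD {α : Type} (v : List α) (i : Int) (w : α) :
    (PySem.List.pySetD v i w).length = v.length := by
  simp only [PySem.List.pySetD, PySem.List.pySet?]
  cases PySem.List.pyIdx? v.length i <;> simp

lemma getD_replicate {α : Type} (n : Nat) (d e : α) (i : Int)
    (h0 : -(n : Int) ≤ i) (h1 : i < (n : Int)) :
    PySem.List.pyGetD (List.replicate n d) i e = d := by
  have hn : 0 < n := by omega
  have hk := wrapI_lt n i h0 h1 hn
  simp only [PySem.List.pyGetD, PySem.List.pyGet?, List.length_replicate, pyIdx_in n i h0 h1]
  simp [List.getElem?_replicate, hk]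

lemma getD_congr_wrap {α : Type} (ch : List α) (d : α) (i j : Int)
    (hi0 : -(ch.length : Int) ≤ i) (hi1 : i < (ch.length : Int))
    (hj0 : -(ch.length : Int) ≤ j) (hj1 : j < (ch.length : Int))
    (h : wrapI ch.length i = wrapI ch.length j) :
    PySem.List.pyGetD ch i d = PySem.List.pyGetD ch j d := by
  simp only [PySem.List.pyGetD, PySem.List.pyGet?,
    pyIdx_in ch.length i hi0 hi1, pyIdx_in ch.length j hj0 hj1, h]

lemma mem_buildCh_aux (n : Nat) : ∀ (l : List (Int × Int)) (ch : List (List Int)),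
    ch.length = n →
    (∀ pc ∈ l, -(n : Int) ≤ pc.1 ∧ pc.1 < (n : Int)) →
    ∀ (x : Int), -(n : Int) ≤ x → x < (n : Int) → ∀ y : Int,
    (y ∈ PySem.List.pyGetD (l.foldl (fun ch pc =>
        PySem.List.pySetD ch pc.1 (PySem.List.pyGetD ch pc.1 [] ++ [pc.2])) ch) x [] ↔
      y ∈ PySem.List.pyGetD ch x [] ∨ ∃ pc ∈ l, wrapI n pc.1 = wrapI n x ∧ pc.2 = y) := by
  intro l
  induction l with
  | nil => intro ch _ _ x _ _ y; simp
  | cons pc t ih =>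
    intro ch hlen hE x hx0 hx1 y
    obtain ⟨hp0, hp1⟩ := hE pc List.mem_cons_self
    rw [List.foldl_cons]
    rw [ih _ (by rw [length_setD]; exact hlen)
      (fun q hq => hE q (List.mem_cons_of_mem _ hq)) x hx0 hx1 y]
    rw [getD_setD ch [] _ pc.1 x (by omega) (by omega) (by omega) (by omega), hlen]
    rw [List.exists_mem_cons_iff]
    by_cases h : wrapI n x = wrapI n pc.1
    · have hgg : PySem.List.pyGetD ch pc.1 ([] : List Int) = PySem.List.pyGetD ch x [] :=
        getD_congr_wrap ch [] pc.1 x (by rw [hlen]; omega) (by rw [hlen]; omega)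
          (by rw [hlen]; omega) (by rw [hlen]; omega) (by rw [hlen]; exact h.symm)
      rw [if_pos h, hgg, List.mem_append, List.mem_singleton]
      constructor
      · rintro ((hy | hy) | hy)
        · exact Or.inl hy
        · exact Or.inr (Or.inl ⟨h.symm, hy.symm⟩)
        · exact Or.inr (Or.inr hy)
      · rintro (hy | (⟨_, hy⟩ | hy))
        · exact Or.inl (Or.inl hy)
        · exact Or.inl (Or.inr hy.symm)
        · exact Or.inr hy
    · rw [if_neg h]
      constructor
      · rintro (hy | hy)
        · exact Or.inl hy
        · exact Or.inr (Or.inr hy)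
      · rintro (hy | (⟨h1, _⟩ | hy))
        · exact Or.inl hy
        · exact absurd h1.symm h
        · exact Or.inr hy

lemma mem_buildCh (n : Nat) (edges : List (Int × Int))
    (hE : ∀ pc ∈ edges, -(n : Int) ≤ pc.1 ∧ pc.1 < (n : Int))
    (x : Int) (hx0 : -(n : Int) ≤ x) (hx1 : x < (n : Int)) (y : Int) :
    y ∈ PySem.List.pyGetD (buildCh n edges) x [] ↔
      ∃ pc ∈ edges, wrapI n pc.1 = wrapI n x ∧ pc.2 = y := by
  unfold buildCh
  rw [mem_buildCh_aux n edges (List.replicate n []) (by simp) hE x hx0 hx1 y,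
    getD_replicate n [] [] x hx0 hx1]
  simp

lemma foldl_max_assoc (l : List Int) : ∀ a b : Int, l.foldl max (max a b) = max a (l.foldl max b) := by
  induction l with
  | nil => intro a b; rfl
  | cons x t ih => intro a b; simp only [List.foldl_cons]; rw [max_assoc, ih]

lemma foldl_max_nonneg (l : List Int) (b : Int) (hb : 0 ≤ b) :
    l.foldl max b = max b (lmax0 l) := by
  have h := foldl_max_assoc l b 0
  rw [max_eq_left hb] at h
  exact h

lemma foldl_max_flatMap {α : Type} (g : α → List Int) (cs : List α) : ∀ b : Int,
    (cs.flatMap g).foldl max b = cs.foldl (fun acc pc => (g pc).foldl max acc) b := by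
  induction cs with
  | nil => intro b; rfl
  | cons pc t ih => intro b; simp only [List.flatMap_cons, List.foldl_append, List.foldl_cons]; rw [ih]

lemma foldl_max_split {α : Type} (g : α → List Int) (cs : List α) : ∀ b : Int, 0 ≤ b →
    cs.foldl (fun acc pc => (g pc).foldl max acc) b = cs.foldl (fun acc pc => max acc (lmax0 (g pc))) b := by
  induction cs with
  | nil => intro b _; rfl
  | cons pc t ih =>
    intro b hb
    simp only [List.foldl_cons]
    rw [foldl_max_nonneg _ b hb, ih (max b (lmax0 (g pc))) (le_trans hb (le_max_left _ _))]

lemma mfold_le_init (F : Int → Int) (l : List Int) : ∀ a : Int, a ≤ l.foldl (fun b x => max b (F x)) a := by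
  induction l with
  | nil => intro a; exact le_refl a
  | cons x t ih => intro a; exact le_trans (le_max_left a (F x)) (ih _)

lemma mfold_le_mem (F : Int → Int) (l : List Int) : ∀ (a x : Int), x ∈ l → F x ≤ l.foldl (fun b x => max b (F x)) a := by
  induction l with
  | nil => intro a x hx; cases hx
  | cons y t ih =>
    intro a x hx
    rcases List.mem_cons.mp hx with h | h
    · subst h; exact le_trans (le_max_right a (F x)) (mfold_le_init F t _)
    · exact ih _ _ h

lemma mfold_le_of (F : Int → Int) (l : List Int) : ∀ (a z : Int), a ≤ z → (∀ x ∈ l, F x ≤ z) →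
    l.foldl (fun b x => max b (F x)) a ≤ z := by
  induction l with
  | nil => intro a z ha _; exact ha
  | cons y t ih =>
    intro a z ha h
    exact ih _ _ (max_le ha (h y (List.mem_cons_self))) (fun x hx => h x (List.mem_cons_of_mem _ hx))

lemma mfold_congr (F : Int → Int) (l₁ l₂ : List Int) (a : Int) (h : ∀ x : Int, x ∈ l₁ ↔ x ∈ l₂) :
    l₁.foldl (fun b x => max b (F x)) a = l₂.foldl (fun b x => max b (F x)) a := by
  apply le_antisymm
  · exact mfold_le_of F l₁ a _ (mfold_le_init F l₂ a)
      (fun x hx => mfold_le_mem F l₂ a x ((h x).mp hx))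
  · exact mfold_le_of F l₂ a _ (mfold_le_init F l₁ a)
      (fun x hx => mfold_le_mem F l₁ a x ((h x).mpr hx))

lemma getB_set (v : List Bool) (c i : Int)
    (hc0 : -(v.length : Int) ≤ c) (hc1 : c < (v.length : Int))
    (hi0 : -(v.length : Int) ≤ i) (hi1 : i < (v.length : Int)) :
    pyGetB (PySem.List.pySetD v c true) i =
      if wrapI v.length i = wrapI v.length c then true else pyGetB v i := by
  unfold pyGetB
  exact getD_setD v false true c i hc0 hc1 hi0 hi1

lemma inv_step (info : List Int) (edges : List (Int × Int))
    (hE : ∀ pc ∈ edges,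
      -(info.length : Int) ≤ pc.1 ∧ pc.1 < (info.length : Int) ∧
      -(info.length : Int) ≤ pc.2 ∧ pc.2 < (info.length : Int))
    (v : List Bool) (frontier : List Int) (x : Int)
    (hlen : v.length = info.length)
    (hfr : ∀ z : Int, z ∈ frontier ↔ chard info edges v z)
    (hx : x ∈ frontier) :
    ∀ y : Int,
      y ∈ (frontier ++ PySem.List.pyGetD (buildCh info.length edges) x []).filter
        (fun y => !pyGetB (PySem.List.pySetD v x true) y) ↔
      chard info edges (PySem.List.pySetD v x true) y := by
  obtain ⟨hx0, hx1, hxv, _⟩ := (hfr x).mp hx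
  have hvl : (v.length : Int) = (info.length : Int) := by exact_mod_cast congrArg Nat.cast hlen
  have hset : ∀ i : Int, -(info.length : Int) ≤ i → i < (info.length : Int) →
      pyGetB (PySem.List.pySetD v x true) i =
        if wrapI info.length i = wrapI info.length x then true else pyGetB v i := by
    intro i h0 h1
    rw [getB_set v x i (by omega) (by omega) (by omega) (by omega), hlen]
  have hE1 : ∀ pc ∈ edges, -(info.length : Int) ≤ pc.1 ∧ pc.1 < (info.length : Int) :=
    fun pc hpc => ⟨(hE pc hpc).1, (hE pc hpc).2.1⟩
  intro y
  rw [List.mem_filter, List.mem_append, Bool.not_eq_eq_eq_not, Bool.not_true]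
  constructor
  · rintro ⟨hy, hyv⟩
    rcases hy with hyf | hyc
    · obtain ⟨y0, y1, yv, pc, hpc, h2y, hpv⟩ := (hfr y).mp hyf
      refine ⟨y0, y1, hyv, pc, hpc, h2y, ?_⟩
      obtain ⟨a0, a1, _, _⟩ := hE _ hpc
      rw [hset _ a0 a1]
      by_cases hh : wrapI info.length pc.1 = wrapI info.length x <;> simp [hh, hpv]
    · obtain ⟨pc, hpc, h1x, h2y⟩ := (mem_buildCh info.length edges hE1 x hx0 hx1 y).mp hyc
      obtain ⟨_, _, b0, b1⟩ := hE _ hpc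
      refine ⟨by omega, by omega, hyv, pc, hpc, h2y, ?_⟩
      rw [hset _ (hE _ hpc).1 (hE _ hpc).2.1, if_pos h1x]
  · rintro ⟨y0, y1, yv', pc, hpc, h2y, hpv'⟩
    refine ⟨?_, yv'⟩
    obtain ⟨a0, a1, _, _⟩ := hE _ hpc
    rw [hset _ a0 a1] at hpv'
    by_cases hh : wrapI info.length pc.1 = wrapI info.length x
    · right
      exact (mem_buildCh info.length edges hE1 x hx0 hx1 y).mpr ⟨pc, hpc, hh, h2y⟩
    · left
      rw [hset _ y0 y1] at yv'
      have hwy : wrapI info.length y ≠ wrapI info.length x := by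
        intro hcon; rw [if_pos hcon] at yv'; cases yv'
      rw [if_neg hwy] at yv'
      exact (hfr y).mpr ⟨y0, y1, yv', pc, hpc, h2y, by simpa [hh] using hpv'⟩

lemma dfs_eq (info : List Int) (edges : List (Int × Int))
    (hE : ∀ pc ∈ edges,
      -(info.length : Int) ≤ pc.1 ∧ pc.1 < (info.length : Int) ∧
      -(info.length : Int) ≤ pc.2 ∧ pc.2 < (info.length : Int)) :
    ∀ (fuel : Nat) (v : List Bool) (frontier : List Int) (s w : Int),
      v.length = info.length →
      (∀ z : Int, z ∈ frontier ↔ chard info edges v z) →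
      1 ≤ s → 0 ≤ w →
      dfsB info (buildCh info.length edges) fuel v frontier s w
        = lmax0 (dfsA info edges fuel v s w) := by
  intro fuel
  induction fuel with
  | zero => intro v frontier s w _ _ _ _; rfl
  | succ fuel ih =>
    intro v frontier s w hlen hfr hs hw
    by_cases hsw : s ≤ w
    · have h1 : ¬ s > w := by omega
      simp [dfsA, dfsB, hsw, h1, lmax0]
    · have hgt : s > w := by omega
      have hA : dfsA info edges (fuel+1) v s w =
          s :: (edges.filter (fun pc => pyGetB v pc.1 && !pyGetB v pc.2)).flatMap
            (fun pc => brA info edges fuel v s w pc.2) := by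
        simp only [dfsA, brA]
        rw [if_pos hgt]
        rw [PySem.List.foldl_if_eq_foldl_filter, PySem.List.foldl_append_eq_flatMap]
        simp
      have hB : dfsB info (buildCh info.length edges) (fuel+1) v frontier s w =
          frontier.foldl (fun best x => max best (brB info edges fuel v frontier s w x)) s := by
        simp only [dfsB, brB]
        rw [if_neg hsw]
      have hmem : ∀ x : Int,
          x ∈ frontier ↔
          x ∈ (edges.filter (fun pc => pyGetB v pc.1 && !pyGetB v pc.2)).map
            (fun pc => pc.2) := by
        intro x
        rw [hfr x]
        constructor
        · rintro ⟨x0, x1, xv, pc, hpc, h2x, hpv⟩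
          refine List.mem_map.mpr ⟨pc, List.mem_filter.mpr ⟨hpc, ?_⟩, h2x⟩
          rw [Bool.and_eq_true, Bool.not_eq_true']
          exact ⟨hpv, by rw [h2x]; exact xv⟩
        · intro hx
          obtain ⟨pc, hmemf, rfl⟩ := List.mem_map.mp hx
          obtain ⟨hpc, hcond⟩ := List.mem_filter.mp hmemf
          rw [Bool.and_eq_true, Bool.not_eq_true'] at hcond
          obtain ⟨hpv, xv⟩ := hcond
          obtain ⟨a0, a1, b0, b1⟩ := hE _ hpc
          exact ⟨b0, b1, xv, pc, hpc, rfl, hpv⟩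
      have hbr : ∀ pc ∈ edges.filter (fun pc => pyGetB v pc.1 && !pyGetB v pc.2),
          brB info edges fuel v frontier s w pc.2
            = lmax0 (brA info edges fuel v s w pc.2) := by
        intro pc hpc
        obtain ⟨hpce, _⟩ := List.mem_filter.mp hpc
        obtain ⟨a0, a1, b0, b1⟩ := hE _ hpce
        have hcfr : pc.2 ∈ frontier :=
          (hmem _).mpr (List.mem_map.mpr ⟨pc, hpc, rfl⟩)
        have hfr' := inv_step info edges hE v frontier pc.2 hlen hfr hcfr
        have hlen' : (PySem.List.pySetD v pc.2 true).length = info.length := by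
          rw [length_setD]; exact hlen
        unfold brA brB
        by_cases hi : getI info pc.2 = 0
        · rw [if_pos hi, if_pos hi]
          exact ih _ _ _ _ hlen' hfr' (by omega) hw
        · rw [if_neg hi, if_neg hi]
          exact ih _ _ _ _ hlen' hfr' hs (by omega)
      rw [hA, hB]
      calc frontier.foldl (fun best x => max best (brB info edges fuel v frontier s w x)) s
          = ((edges.filter (fun pc => pyGetB v pc.1 && !pyGetB v pc.2)).map
              (fun pc => pc.2)).foldl
              (fun best x => max best (brB info edges fuel v frontier s w x)) s :=
            mfold_congr _ _ _ s hmem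
        _ = (edges.filter (fun pc => pyGetB v pc.1 && !pyGetB v pc.2)).foldl
              (fun best pc => max best (brB info edges fuel v frontier s w pc.2)) s := by
            rw [List.foldl_map]
        _ = (edges.filter (fun pc => pyGetB v pc.1 && !pyGetB v pc.2)).foldl
              (fun best pc => max best (lmax0 (brA info edges fuel v s w pc.2))) s := by
            apply PySem.List.foldl_congr_mem
            intro acc pc hpc
            rw [hbr pc hpc]
        _ = (edges.filter (fun pc => pyGetB v pc.1 && !pyGetB v pc.2)).foldl
              (fun acc pc => (brA info edges fuel v s w pc.2).foldl max acc) s :=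
            (foldl_max_split _ _ s (by omega)).symm
        _ = ((edges.filter (fun pc => pyGetB v pc.1 && !pyGetB v pc.2)).flatMap
              (fun pc => brA info edges fuel v s w pc.2)).foldl max s :=
            (foldl_max_flatMap _ _ s).symm
        _ = lmax0 (s :: (edges.filter (fun pc => pyGetB v pc.1 && !pyGetB v pc.2)).flatMap
              (fun pc => brA info edges fuel v s w pc.2)) := by
            simp only [lmax0, List.foldl_cons]
            rw [max_eq_right (by omega : (0:Int) ≤ s)]

-- ===== VERDICT (by name: the statement is the Claim_ definition above) =====
theorem solution_spec : Claim_equal_solution := by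
  intro info edges _ hpre
  obtain ⟨hne, hE⟩ := hpre
  unfold Spec_solution
  have hn : 0 < info.length := List.length_pos_iff.mpr hne
  simp only [solution, solution_alt]
  have hlen0 : (PySem.List.pySetD (List.replicate info.length false) 0 true).length = info.length := by
    rw [length_setD]; simp
  have hE1 : ∀ pc ∈ edges, -(info.length : Int) ≤ pc.1 ∧ pc.1 < (info.length : Int) :=
    fun pc hpc => ⟨(hE pc hpc).1, (hE pc hpc).2.1⟩
  have hget0 : ∀ i : Int, -(info.length : Int) ≤ i → i < (info.length : Int) →
      pyGetB (PySem.List.pySetD (List.replicate info.length false) 0 true) i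
        = if wrapI info.length i = wrapI info.length 0 then true else false := by
    intro i h0 h1
    rw [getB_set (List.replicate info.length false) 0 i (by simp) (by simp; omega)
        (by simpa using h0) (by simpa using h1)]
    simp only [List.length_replicate]
    by_cases h : wrapI info.length i = wrapI info.length 0
    · rw [if_pos h, if_pos h]
    · rw [if_neg h, if_neg h]
      unfold pyGetB
      rw [getD_replicate info.length false false i h0 h1]
  have hfr0 : ∀ z : Int,
      z ∈ (PySem.List.pyGetD (buildCh info.length edges) 0 []).filter
        (fun y => !pyGetB (PySem.List.pySetD (List.replicate info.length false) 0 true) y) ↔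
      chard info edges (PySem.List.pySetD (List.replicate info.length false) 0 true) z := by
    intro z
    rw [List.mem_filter, Bool.not_eq_eq_eq_not, Bool.not_true]
    constructor
    · rintro ⟨hz, hzv⟩
      obtain ⟨pc, hpc, h1x, h2z⟩ :=
        (mem_buildCh info.length edges hE1 0 (by omega) (by exact_mod_cast hn) z).mp hz
      obtain ⟨_, _, b0, b1⟩ := hE _ hpc
      refine ⟨by omega, by omega, hzv, pc, hpc, h2z, ?_⟩
      rw [hget0 _ (hE _ hpc).1 (hE _ hpc).2.1, if_pos h1x]
    · rintro ⟨z0, z1, zv, pc, hpc, h2z, hpv⟩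
      refine ⟨?_, zv⟩
      obtain ⟨a0, a1, _, _⟩ := hE _ hpc
      rw [hget0 _ a0 a1] at hpv
      have h1x : wrapI info.length pc.1 = wrapI info.length 0 := by
        by_contra h; rw [if_neg h] at hpv; cases hpv
      exact (mem_buildCh info.length edges hE1 0 (by omega) (by exact_mod_cast hn) z).mpr
        ⟨pc, hpc, h1x, h2z⟩
  have hmain := dfs_eq info edges hE (info.length + 1)
    (PySem.List.pySetD (List.replicate info.length false) 0 true)
    ((PySem.List.pyGetD (buildCh info.length edges) 0 []).filter
      (fun y => !pyGetB (PySem.List.pySetD (List.replicate info.length false) 0 true) y))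
    1 0 hlen0 hfr0 (le_refl 1) (le_refl 0)
  rw [hmain]
  obtain ⟨L, hL⟩ : ∃ L, dfsA info edges (info.length + 1)
      (PySem.List.pySetD (List.replicate info.length false) 0 true) 1 0 = 1 :: L := by
    simp only [dfsA]
    rw [if_pos (by norm_num : (1:Int) > 0)]
    exact ⟨_, rfl⟩
  rw [hL]
  rw [PySem.List.max?_id_cons]
  simp only [Option.getD_some, lmax0, List.foldl_cons]
  norm_num
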